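-- pv_equiv track=rewrite | github.com/builder-hg/algorithm | baekjoon/custom1.py | check_reverse
-- ===== SOURCE A (Python) =====
-- def check_reverse(raw, limited):
--     # 28, 60 -> 뒤집으면 82이기때문에 return False
--     lst = list(str(raw))[::-1]
--     reverse = 0
--     for i in range(1, len(lst) + 1):
--         val = int(lst[i - 1])
--         if val == 6:
--             val = 9
--         elif val == 9:
--             val = 6
--         reverse += val * (10 ** (len(lst) - i))
--     if reverse >= limited:
--         return False
--     return True
-- ===== SOURCE B (Python) =====
-- def check_reverse(raw, limited):
--     n, rev = raw, 0
--     while n > 0: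
--         n, d = divmod(n, 10)
--         rev = rev * 10 + (15 - d if d in (6, 9) else d)
--     return rev < limited
-- ===== Notes on version B (the rewrite author's own statement) =====
-- stated objective: simpler
-- what changed: Replaces the str/list-reverse/index/power-accumulation loop by a pure-arithmetic divmod loop that builds the 6/9-swapped reversed number digit by digit with a Horner step, no string conversion at all.
-- outside the precondition, e.g. on check_reverse(-5, 10): A raises ValueError, B returns True
import Mathlib
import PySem

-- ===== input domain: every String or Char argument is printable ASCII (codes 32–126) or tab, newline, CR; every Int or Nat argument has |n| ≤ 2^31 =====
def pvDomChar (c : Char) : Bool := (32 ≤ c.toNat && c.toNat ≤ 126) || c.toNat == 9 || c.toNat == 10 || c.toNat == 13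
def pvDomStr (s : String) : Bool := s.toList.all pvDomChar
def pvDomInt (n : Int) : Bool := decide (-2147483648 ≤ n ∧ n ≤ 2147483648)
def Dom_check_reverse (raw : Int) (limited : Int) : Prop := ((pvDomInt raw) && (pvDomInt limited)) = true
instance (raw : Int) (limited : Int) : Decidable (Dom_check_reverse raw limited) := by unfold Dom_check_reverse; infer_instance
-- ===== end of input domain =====

-- B replaces A's string/reverse/index/power loop by a pure-arithmetic divmod loop (Horner step); simpler, same results on raw ≥ 0.

-- ===== PORT A =====
def check_reverse (raw : Int) (limited : Int) : Bool :=
  let lst := (PySem.Int.toStr raw).toList.reverse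
  -- int(lst[i-1]) raises ValueError on a non-digit char (only possible for raw < 0); Pre_ excludes that, so getD 0 is never reached
  let reverse := (PySem.List.pyRange 1 ((lst.length : Int) + 1)).foldl
    (fun reverse i =>
      let val := (PySem.Int.ofChars? [PySem.List.pyGetD lst (i - 1) ' ']).getD 0
      let val := if val = 6 then (9 : Int) else if val = 9 then 6 else val
      reverse + val * (10 : Int) ^ (((lst.length : Int) - i).toNat)) 0
  if reverse ≥ limited then false else true

-- ===== PORT B =====
def revLoop (n : Int) (rev : Int) : Int :=
  if h : 0 < n then
    let d := PySem.Int.mod n 10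
    revLoop (PySem.Int.floordiv n 10) (rev * 10 + (if d = 6 ∨ d = 9 then 15 - d else d))
  else rev
termination_by n.toNat
decreasing_by
  simp only [PySem.Int.floordiv]
  rw [Int.fdiv_eq_ediv_of_nonneg _ (by omega)]
  omega

def check_reverse_alt (raw : Int) (limited : Int) : Bool :=
  decide (revLoop raw 0 < limited)

-- ===== PRECONDITION & SPEC =====
-- Pre_ excludes raw < 0: there A's int() hits the '-' sign mid-loop and raises ValueError.
def Pre_check_reverse (raw : Int) (limited : Int) : Prop := 0 ≤ raw
instance (raw : Int) (limited : Int) : Decidable (Pre_check_reverse raw limited) := by unfold Pre_check_reverse; infer_instance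
def pvWitness_check_reverse : Int × Int := (28, 60)

def Spec_check_reverse (raw : Int) (limited : Int) (out : Bool) : Prop := out = check_reverse_alt raw limited
instance (raw : Int) (limited : Int) (out : Bool) : Decidable (Spec_check_reverse raw limited out) := by unfold Spec_check_reverse; infer_instance

-- ===== CLAIM (what is proved, stated in full; the proofs are below) =====
def Claim_equal_check_reverse : Prop := ∀ (raw : Int) (limited : Int), Dom_check_reverse raw limited → Pre_check_reverse raw limited → Spec_check_reverse raw limited (check_reverse raw limited)

-- ===== LEMMAS AND PROOFS =====

/-- The per-digit value A computes from a digit character: int(c) with the 6↔9 swap. -/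
def digVal (c : Char) : Int :=
  let x := (PySem.Int.ofChars? [c]).getD 0
  if x = 6 then (9 : Int) else if x = 9 then 6 else x

theorem digVal_digitChar (d : Nat) (hd : d < 10) :
    digVal (Nat.digitChar d) = (if (d : Int) = 6 ∨ (d : Int) = 9 then 15 - (d : Int) else (d : Int)) := by
  interval_cases d <;> decide

/-- A's indexed power-sum over any char list equals a left-to-right Horner fold. -/
theorem hornerA (xs : List Char) (e : Nat) (init : Int) :
    (PySem.List.pyRange 1 ((xs.length : Int) + 1)).foldl
      (fun acc i => acc + digVal (PySem.List.pyGetD xs (i - 1) ' ')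
          * (10 : Int) ^ ((((xs.length : Int)) - i).toNat + e)) init
    = init + (xs.foldl (fun a c => 10 * a + digVal c) 0) * 10 ^ e := by
  induction xs using List.reverseRecOn generalizing e init with
  | nil => simp [PySem.List.pyRange]
  | append_singleton xs c ih =>
    have hlen : ((xs ++ [c]).length : Int) = (xs.length : Int) + 1 := by
      simp
    rw [PySem.List.pyRange_one_append 1 ((xs.length : Int) + 1) (((xs ++ [c]).length : Int) + 1)
        (by omega) (by rw [hlen]; omega)]
    rw [List.foldl_append]
    have hstep : (PySem.List.pyRange 1 ((xs.length : Int) + 1)).foldl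
        (fun acc i => acc + digVal (PySem.List.pyGetD (xs ++ [c]) (i - 1) ' ')
          * (10 : Int) ^ (((((xs ++ [c]).length : Int)) - i).toNat + e)) init
        = (PySem.List.pyRange 1 ((xs.length : Int) + 1)).foldl
        (fun acc i => acc + digVal (PySem.List.pyGetD xs (i - 1) ' ')
          * (10 : Int) ^ ((((xs.length : Int)) - i).toNat + (e + 1))) init := by
      apply PySem.List.foldl_congr_mem
      intro acc i hi
      have hmem := (PySem.List.mem_pyRange_one).mp hi
      have h1 : (1 : Int) ≤ i := hmem.1
      have h2 : i < (xs.length : Int) + 1 := hmem.2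
      have hget : PySem.List.pyGetD (xs ++ [c]) (i - 1) ' ' = PySem.List.pyGetD xs (i - 1) ' ' := by
        rw [PySem.List.pyGetD_eq_getElem _ ' ' (by omega) (by simp; omega),
            PySem.List.pyGetD_eq_getElem _ ' ' (by omega) (by omega)]
        rw [List.getElem_append_left]
      rw [hget, hlen]
      have hx : (((xs.length : Int) + 1) - i).toNat + e = (((xs.length : Int)) - i).toNat + (e + 1) := by omega
      rw [hx]
    rw [hstep, ih]
    have hlast : PySem.List.pyRange ((xs.length : Int) + 1) (((xs ++ [c]).length : Int) + 1)
        = [(xs.length : Int) + 1] := by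
      rw [hlen]
      rw [PySem.List.pyRange_one_cons (by omega)]
      simp [PySem.List.pyRange]
    rw [hlast]
    simp only [List.foldl_cons, List.foldl_nil, List.foldl_append]
    have hgetc : PySem.List.pyGetD (xs ++ [c]) ((xs.length : Int) + 1 - 1) ' ' = c := by
      have : ((xs.length : Int) + 1 - 1) = ((xs.length : Nat) : Int) := by omega
      rw [this, PySem.List.pyGetD_natCast]
      simp
    rw [hgetc, hlen]
    have hexp : ((((xs.length : Int) + 1) - ((xs.length : Int) + 1)).toNat + e) = e := by omega
    rw [hexp]
    ring

/-- cast facts for floordiv/mod on naturals -/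
theorem fdiv_cast10 (n : Nat) : PySem.Int.floordiv (n : Int) 10 = ((n / 10 : Nat) : Int) := by
  simp only [PySem.Int.floordiv]
  rw [Int.fdiv_eq_ediv_of_nonneg _ (by omega)]
  omega

theorem fmod_cast10 (n : Nat) : PySem.Int.mod (n : Int) 10 = ((n % 10 : Nat) : Int) := by
  simp only [PySem.Int.mod]
  rw [Int.fmod_eq_emod_of_nonneg _ (by omega)]
  omega

/-- B's divmod loop computes the Horner fold over the reversed decimal digits. -/
theorem revLoop_eq (n : Nat) (hn : 0 < n) (rev : Int) :
    ((Nat.toDigits 10 n).reverse).foldl (fun a c => 10 * a + digVal c) rev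
      = revLoop (n : Int) rev := by
  induction n using Nat.strong_induction_on generalizing rev with
  | _ n ih =>
    rw [revLoop, dif_pos (by exact_mod_cast hn)]
    rw [fdiv_cast10, fmod_cast10]
    by_cases h10 : n < 10
    · rw [Nat.toDigits_of_lt_base h10]
      have hmod : n % 10 = n := Nat.mod_eq_of_lt h10
      have hdiv : n / 10 = 0 := Nat.div_eq_of_lt h10
      rw [hmod, hdiv]
      rw [revLoop, dif_neg (by omega)]
      simp only [List.reverse_singleton, List.foldl_cons, List.foldl_nil]
      rw [digVal_digitChar n h10]
      ring
    · rw [Nat.toDigits_of_base_le (by omega) (by omega)]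
      rw [List.reverse_append, List.reverse_singleton]
      simp only [List.singleton_append, List.foldl_cons]
      rw [digVal_digitChar (n % 10) (Nat.mod_lt _ (by omega))]
      rw [ih (n / 10) (by omega) (by omega)]
      ring_nf

/-- the digit list A iterates over, for raw ≥ 0 -/
theorem toChars_nonneg (raw : Int) (h : 0 ≤ raw) :
    (PySem.Int.toStr raw).toList = Nat.toDigits 10 raw.toNat := by
  rw [PySem.Int.toList_toStr]
  simp only [PySem.Int.toChars]
  rw [if_neg (by omega)]

-- ===== VERDICT (by name: the statement is the Claim_ definition above) =====
theorem check_reverse_spec : Claim_equal_check_reverse := by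
  intro raw limited _ hpre
  have hpre' : (0 : Int) ≤ raw := hpre
  unfold Spec_check_reverse check_reverse check_reverse_alt
  simp only []
  rw [toChars_nonneg raw hpre']
  have hA := hornerA ((Nat.toDigits 10 raw.toNat).reverse) 0 0
  simp only [pow_zero, mul_one, zero_add] at hA
  have hfold : (PySem.List.pyRange 1 (((Nat.toDigits 10 raw.toNat).reverse.length : Int) + 1)).foldl
      (fun reverse i =>
        let val := (PySem.Int.ofChars? [PySem.List.pyGetD ((Nat.toDigits 10 raw.toNat).reverse) (i - 1) ' ']).getD 0
        let val := if val = 6 then (9 : Int) else if val = 9 then 6 else val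
        reverse + val * (10 : Int) ^ ((((Nat.toDigits 10 raw.toNat).reverse.length : Int)) - i).toNat) 0
      = revLoop raw 0 := by
    have hshape : (PySem.List.pyRange 1 (((Nat.toDigits 10 raw.toNat).reverse.length : Int) + 1)).foldl
        (fun reverse i =>
          let val := (PySem.Int.ofChars? [PySem.List.pyGetD ((Nat.toDigits 10 raw.toNat).reverse) (i - 1) ' ']).getD 0
          let val := if val = 6 then (9 : Int) else if val = 9 then 6 else val
          reverse + val * (10 : Int) ^ ((((Nat.toDigits 10 raw.toNat).reverse.length : Int)) - i).toNat) 0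
        = (PySem.List.pyRange 1 (((Nat.toDigits 10 raw.toNat).reverse.length : Int) + 1)).foldl
        (fun acc i => acc + digVal (PySem.List.pyGetD ((Nat.toDigits 10 raw.toNat).reverse) (i - 1) ' ')
          * (10 : Int) ^ (((((Nat.toDigits 10 raw.toNat).reverse.length : Int)) - i).toNat + 0)) 0 := by
      apply PySem.List.foldl_congr_mem
      intro acc i _
      simp [digVal]
    rw [hshape, hA]
    rcases Nat.eq_zero_or_pos raw.toNat with h0 | hpos
    · have hraw : raw = 0 := by omega
      subst hraw
      rw [h0]
      rw [revLoop, dif_neg (by omega)]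
      simp only [Nat.toDigits_zero, List.reverse_singleton, List.foldl_cons, List.foldl_nil]
      decide
    · rw [revLoop_eq raw.toNat hpos 0]
      congr 1
      omega
  rw [hfold]
  by_cases h : revLoop raw 0 ≥ limited
  · rw [if_pos h]
    simp
    omega
  · rw [if_neg h]
    simp
    omega
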